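-- pv_equiv track=rewrite | github.com/richardcode/WU_prep_TCRE1.5 | xmls/generate_xml_cmip6hist.py | anc
-- ===== SOURCE A (Python) =====
-- def anc(old):
--   """ This is a function that updates the alphanumeric umid value """
--
--   #Convert alphanumeric string into numeric string
--   charlist=list(old)
--   i=len(charlist)-1
--   num=[]
--   for c in charlist:
--     num.append(ord(c))
--
--   while i>0:
--     #If character has value '9', set next value to 'a'
--     if num[i]==57:
--       num[i]=97
--       i=0
--     #If character has value 'z', set next value to '0' and transition to the next column
--     elif num[i]==122:
--       num[i]=48
--       i=i-1
--     #Else add one to the value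
--     else:
--       num[i]=num[i]+1
--       i=0
--
--   #Convert back into a alphanumeric string
--   new=[]
--   for n in num:
--     new.append(chr(n))
--   out=''.join(new)
--
--   return out
-- ===== SOURCE B (Python) =====
-- def anc(old):
--   """ This is a function that updates the alphanumeric umid value """
--   if len(old) <= 1:
--     return old
--   body = old[1:]
--   stripped = body.rstrip('z')
--   zeros = '0' * (len(body) - len(stripped))
--   if not stripped:
--     return old[0] + zeros
--   c = stripped[-1]
--   inc = 'a' if c == '9' else chr(ord(c) + 1)
--   return old[0] + stripped[:-1] + inc + zeros
-- ===== Notes on version B (the rewrite author's own statement) =====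
-- stated objective: simpler
-- what changed: B finds the carry boundary with a single rstrip('z') and assembles the result by string slicing, instead of converting the whole string to a list of ordinals and mutating it in a positional carry loop.
import Mathlib
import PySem

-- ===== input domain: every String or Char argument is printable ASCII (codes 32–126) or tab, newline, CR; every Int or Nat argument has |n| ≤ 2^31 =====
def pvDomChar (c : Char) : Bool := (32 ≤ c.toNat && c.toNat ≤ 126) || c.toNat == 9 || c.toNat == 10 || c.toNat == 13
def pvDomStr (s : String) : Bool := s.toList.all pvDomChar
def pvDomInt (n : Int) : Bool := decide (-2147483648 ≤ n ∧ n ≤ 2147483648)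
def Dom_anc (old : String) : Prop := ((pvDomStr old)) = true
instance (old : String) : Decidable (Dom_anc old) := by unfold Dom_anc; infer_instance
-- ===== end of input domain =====

-- B replaces A's ordinal-list conversion and positional carry loop by rstrip('z') + slicing (objective: simpler).

-- ===== PORT A =====
-- A's while loop: state is (num, i); i strictly decreases (the '9' and else branches set i=0, exiting)
def ancLoop (num : List Int) (i : Int) : List Int :=
  if h : i > 0 then
    -- num[i]: in A the index is always in range, so pyGet? returns some there
    let v := (PySem.List.pyGet? num i).getD 0
    if v = 57 then PySem.List.pySetD num i 97          -- num[i] = 97; i = 0 exits the loop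
    else if v = 122 then ancLoop (PySem.List.pySetD num i 48) (i - 1)
    else PySem.List.pySetD num i (v + 1)               -- num[i] += 1; i = 0 exits the loop
  else num
termination_by i.toNat
decreasing_by omega

def anc (old : String) : String :=
  let charlist := old.toList
  let num := charlist.map (fun c => (c.toNat : Int))   -- ord(c)
  let res := ancLoop num ((charlist.length : Int) - 1)
  String.ofList (res.map (fun n => Char.ofNat n.toNat))    -- chr(n)

-- ===== PORT B =====
def anc_alt (old : String) : String :=
  let cs := old.toList
  if cs.length ≤ 1 then old
  else
    let body := cs.drop 1                                               -- old[1:]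
    let stripped := (body.reverse.dropWhile (fun c => c == 'z')).reverse -- body.rstrip('z'), ported by hand (exact)
    let zeros := List.replicate (body.length - stripped.length) '0'     -- '0' * (len(body)-len(stripped))
    if stripped = [] then String.ofList (cs.take 1 ++ zeros)
    else
      let c := stripped.getLastD ' '                                    -- stripped[-1] (stripped is nonempty here)
      let inc := if c = '9' then 'a' else Char.ofNat (c.toNat + 1)      -- chr(ord(c)+1)
      String.ofList (cs.take 1 ++ stripped.dropLast ++ [inc] ++ zeros)

-- ===== PRECONDITION & SPEC =====
def Spec_anc (old : String) (out : String) : Prop := out = anc_alt old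
instance (old : String) (out : String) : Decidable (Spec_anc old out) := by unfold Spec_anc; infer_instance

-- ===== CLAIM (what is proved, stated in full; the proofs are below) =====
def Claim_equal_anc : Prop := ∀ (old : String), Dom_anc old → Spec_anc old (anc old)

-- ===== LEMMAS AND PROOFS =====

-- the carry step on the REVERSED tail: common specification both ports are reduced to
def carryRev : List Char → List Char
  | [] => []
  | c :: cs =>
    if c = 'z' then '0' :: carryRev cs
    else (if c = '9' then 'a' else Char.ofNat (c.toNat + 1)) :: cs

theorem ancLoop_pos (num : List Int) (i : Int) (h : i > 0) :
    ancLoop num i =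
      (let v := (PySem.List.pyGet? num i).getD 0
       if v = 57 then PySem.List.pySetD num i 97
       else if v = 122 then ancLoop (PySem.List.pySetD num i 48) (i - 1)
       else PySem.List.pySetD num i (v + 1)) := by
  rw [ancLoop]; simp [h]

theorem ancLoop_nonpos (num : List Int) (i : Int) (h : ¬ i > 0) : ancLoop num i = num := by
  rw [ancLoop]; simp [h]

theorem toNat_inj' {v c : Char} (h : v.toNat = c.toNat) : v = c := by
  rw [← Char.ofNat_toNat v, h, Char.ofNat_toNat]

-- the loop never touches indices > i, so a suffix beyond i passes through unchanged
theorem ancLoop_append (suffix : List Int) :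
    ∀ (n : Nat) (num : List Int), n < num.length →
      ancLoop (num ++ suffix) (n : Int) = ancLoop num (n : Int) ++ suffix := by
  intro n
  induction n with
  | zero =>
    intro num _
    rw [ancLoop_nonpos _ _ (by omega), ancLoop_nonpos _ _ (by omega)]
  | succ k ih =>
    intro num h
    have hp : ((k + 1 : Nat) : Int) > 0 := by positivity
    rw [ancLoop_pos _ _ hp, ancLoop_pos _ _ hp]
    have hget : PySem.List.pyGet? (num ++ suffix) ((k + 1 : Nat) : Int)
        = PySem.List.pyGet? num ((k + 1 : Nat) : Int) := by
      rw [PySem.List.pyGet?_natCast, PySem.List.pyGet?_natCast, List.getElem?_append_left h]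
    simp only [hget, PySem.List.pySetD_natCast]
    rw [List.set_append_left _ _ h, List.set_append_left _ _ h, List.set_append_left _ _ h]
    have hi : ((k + 1 : Nat) : Int) - 1 = ((k : Nat) : Int) := by push_cast; ring
    split_ifs
    · rfl
    · rw [hi, ih (num.set (k+1) 48) (by simp; omega)]
    · rfl

theorem map_chr_ord (l : List Char) :
    (l.map (fun c => (c.toNat : Int))).map (fun n => Char.ofNat n.toNat) = l := by
  simp [List.map_map, Function.comp_def, Char.ofNat_toNat]

theorem ancLoop_carry (a : Char) (rest : List Char) :
    (ancLoop ((a :: rest).map (fun c => (c.toNat : Int))) ((rest.length : Int))).map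
        (fun n => Char.ofNat n.toNat)
      = a :: (carryRev rest.reverse).reverse := by
  induction rest using List.reverseRecOn with
  | nil =>
    rw [ancLoop_nonpos _ _ (by simp)]
    simp [carryRev, Char.ofNat_toNat]
  | append_singleton ys v ih =>
    set pre := (a :: ys).map (fun c => (c.toNat : Int)) with hpredef
    have hpre : pre.length = ys.length + 1 := by rw [hpredef]; simp
    have hmap : ((a :: (ys ++ [v])).map (fun c => (c.toNat : Int)))
        = pre ++ [(v.toNat : Int)] := by rw [hpredef]; simp
    have hidx : (((ys ++ [v]).length : Nat) : Int) = ((pre.length : Nat) : Int) := by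
      rw [hpre]; simp
    have hp : ((pre.length : Nat) : Int) > 0 := by rw [hpre]; positivity
    rw [hmap, hidx, ancLoop_pos _ _ hp, PySem.List.pyGet?_append_length]
    simp only [Option.getD_some]
    by_cases hv9 : v = '9'
    · subst hv9
      rw [if_pos (by decide)]
      rw [PySem.List.pySetD_natCast, List.set_append, if_neg (by omega),
        Nat.sub_self, List.set_cons_zero]
      rw [List.map_append, hpredef, map_chr_ord]
      simp [carryRev]
    · by_cases hvz : v = 'z'
      · subst hvz
        rw [if_neg (by decide), if_pos (by decide)]
        rw [PySem.List.pySetD_natCast, List.set_append, if_neg (by omega),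
          Nat.sub_self, List.set_cons_zero]
        have hi : ((pre.length : Nat) : Int) - 1 = ((ys.length : Nat) : Int) := by
          rw [hpre]; push_cast; ring
        rw [hi, ancLoop_append _ ys.length _ (by omega), List.map_append, ih]
        simp [carryRev]
      · have h9 : ¬ ((v.toNat : Int) = 57) := by
          intro h; exact hv9 (toNat_inj' (by exact_mod_cast h))
        have hz : ¬ ((v.toNat : Int) = 122) := by
          intro h; exact hvz (toNat_inj' (by exact_mod_cast h))
        rw [if_neg h9, if_neg hz]
        rw [PySem.List.pySetD_natCast, List.set_append, if_neg (by omega),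
          Nat.sub_self, List.set_cons_zero]
        rw [List.map_append, hpredef, map_chr_ord]
        have hplus : ((v.toNat : Int) + 1).toNat = v.toNat + 1 := by omega
        simp [carryRev, hvz, hv9, hplus]

theorem btail0 (rev : List Char) :
    (if ((rev.dropWhile (fun c => c == 'z')).reverse = ([] : List Char)) then
        List.replicate (rev.length - (rev.dropWhile (fun c => c == 'z')).reverse.length) '0'
      else (rev.dropWhile (fun c => c == 'z')).reverse.dropLast
          ++ [if (rev.dropWhile (fun c => c == 'z')).reverse.getLastD ' ' = '9' then 'a'
              else Char.ofNat (((rev.dropWhile (fun c => c == 'z')).reverse.getLastD ' ').toNat + 1)]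
          ++ List.replicate (rev.length - (rev.dropWhile (fun c => c == 'z')).reverse.length) '0')
    = (carryRev rev).reverse := by
  induction rev with
  | nil => simp [carryRev]
  | cons c cs ih =>
    by_cases hc : c = 'z'
    · subst hc
      rw [List.dropWhile_cons_of_pos (by decide)]
      have hd : (List.dropWhile (fun c => c == 'z') cs).length ≤ cs.length :=
        List.length_dropWhile_le _ _
      have hlen : ('z' :: cs).length - (List.dropWhile (fun c => c == 'z') cs).reverse.length
          = (cs.length - (List.dropWhile (fun c => c == 'z') cs).reverse.length) + 1 := by
        simp only [List.length_cons, List.length_reverse]; omega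
      rw [hlen, List.replicate_succ']
      have hR : (carryRev ('z' :: cs)).reverse = (carryRev cs).reverse ++ ['0'] := by
        simp [carryRev]
      rw [hR, ← ih]
      split_ifs <;> simp [List.append_assoc]
    · rw [List.dropWhile_cons_of_neg (by simpa using hc)]
      simp only [List.reverse_cons]
      rw [if_neg (by simp)]
      have hlast : (cs.reverse ++ [c]).getLastD ' ' = c := by
        simp [List.getLastD_eq_getLast?]
      have hlen0 : (c :: cs).length - (cs.reverse ++ [c]).length = 0 := by simp
      rw [hlast, hlen0, List.dropLast_concat]
      simp [carryRev, hc]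

-- btail0 restated with the tail l itself (rev = l.reverse), as it occurs in anc_alt
theorem btail (l : List Char) :
    (if ((l.reverse.dropWhile (fun c => c == 'z')).reverse = ([] : List Char)) then
        List.replicate (l.length - (l.reverse.dropWhile (fun c => c == 'z')).reverse.length) '0'
      else (l.reverse.dropWhile (fun c => c == 'z')).reverse.dropLast
          ++ [if (l.reverse.dropWhile (fun c => c == 'z')).reverse.getLastD ' ' = '9' then 'a'
              else Char.ofNat (((l.reverse.dropWhile (fun c => c == 'z')).reverse.getLastD ' ').toNat + 1)]
          ++ List.replicate (l.length - (l.reverse.dropWhile (fun c => c == 'z')).reverse.length) '0')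
    = (carryRev l.reverse).reverse := by
  have h := btail0 l.reverse
  rw [show l.reverse.length = l.length from List.length_reverse] at h
  exact h

theorem anc_spec_aux : ∀ (cs : List Char), anc (String.ofList cs) = anc_alt (String.ofList cs) := by
  intro cs
  unfold anc anc_alt
  simp only [String.toList_ofList]
  cases cs with
  | nil =>
    rw [ancLoop_nonpos _ _ (by simp)]
    simp
  | cons a rest =>
    cases rest with
    | nil =>
      rw [show ((([a] : List Char).length : Int) - 1) = (0 : Int) by simp,
        ancLoop_nonpos _ _ (by simp), map_chr_ord]
      simp
    | cons b rest' =>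
      have hlen : (((a :: b :: rest').length : Nat) : Int) - 1
          = (((b :: rest').length : Nat) : Int) := by push_cast [List.length_cons]; ring
      rw [hlen, ancLoop_carry]
      simp only [List.drop_succ_cons, List.drop_zero, List.take_succ_cons, List.take_zero]
      rw [if_neg (by simp)]
      rw [← btail (b :: rest')]
      split_ifs <;> simp [List.append_assoc]

-- ===== VERDICT (by name: the statement is the Claim_ definition above) =====
theorem anc_spec : Claim_equal_anc := by
  intro old _
  obtain ⟨cs, rfl⟩ : ∃ cs, old = String.ofList cs := ⟨old.toList, String.ofList_toList.symm⟩
  unfold Spec_anc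
  exact anc_spec_aux cs
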